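-- pv_equiv track=rewrite | github.com/vasighiz/cv-builder | src/modules/final_resume_generator.py | _is_research_role
-- ===== SOURCE A (Python) =====
-- from typing import Dict, Any, List, Optional
--
-- def _is_research_role(role_info: Dict[str, Any], requirements: List[str], responsibilities: List[str]) -> bool:
--     """Determine if this is a research-focused role"""
--     research_keywords = ['research', 'phd', 'publication', 'academic', 'scientist', 'investigation', 'study']
--
--     # Check role category
--     role_category = role_info.get('role_category', '').lower()
--     if any(keyword in role_category for keyword in research_keywords):
--         return True
--
--     # Check requirements
--     requirements_text = ' '.join(requirements).lower()
--     if any(keyword in requirements_text for keyword in research_keywords):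
--         return True
--
--     # Check responsibilities
--     responsibilities_text = ' '.join(responsibilities).lower()
--     if any(keyword in responsibilities_text for keyword in research_keywords):
--         return True
--
--     return False
-- ===== SOURCE B (Python) =====
-- def _is_research_role(role_info, requirements, responsibilities):
--     """Determine if this is a research-focused role"""
--     keywords = ('research', 'phd', 'publication', 'academic', 'scientist', 'investigation', 'study')
--     corpus = ' '.join([role_info.get('role_category', ''),
--                        ' '.join(requirements),
--                        ' '.join(responsibilities)]).lower()
--     # position-major naive multi-pattern search: one left-to-right scan of the
--     # corpus, testing at each position whether some keyword starts there
--     for i in range(len(corpus)):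
--         if corpus.startswith(keywords, i):
--             return True
--     return False
-- ===== Notes on version B (the rewrite author's own statement) =====
-- stated objective: alternative
-- what changed: B builds one space-joined lowercase corpus and runs a position-major naive multi-pattern search (one left-to-right scan testing at each position whether any keyword starts there), replacing A's keyword-major design of three separate lower-then-'in' substring guard blocks; a space separator is safe because no keyword contains a space.
import Mathlib
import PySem

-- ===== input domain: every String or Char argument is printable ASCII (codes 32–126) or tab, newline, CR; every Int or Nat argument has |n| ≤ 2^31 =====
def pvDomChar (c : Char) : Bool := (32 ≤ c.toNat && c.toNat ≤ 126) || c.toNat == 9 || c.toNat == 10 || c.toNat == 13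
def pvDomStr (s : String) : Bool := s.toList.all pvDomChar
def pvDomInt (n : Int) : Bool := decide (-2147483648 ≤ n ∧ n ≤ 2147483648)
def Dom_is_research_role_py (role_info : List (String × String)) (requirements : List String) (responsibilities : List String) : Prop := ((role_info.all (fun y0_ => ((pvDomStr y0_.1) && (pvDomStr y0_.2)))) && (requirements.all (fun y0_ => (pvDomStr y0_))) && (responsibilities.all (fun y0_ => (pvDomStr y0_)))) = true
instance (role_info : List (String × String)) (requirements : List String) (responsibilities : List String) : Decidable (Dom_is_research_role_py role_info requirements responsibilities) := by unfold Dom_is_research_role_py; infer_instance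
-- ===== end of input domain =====

-- B replaces A's keyword-major three-block substring guards by one space-joined
-- lowercase corpus scanned once position-by-position, testing at each position
-- whether some keyword starts there (objective: alternative decomposition).

-- the keyword list shared by both programs
def pvResearchKeywords : List String :=
  ["research", "phd", "publication", "academic", "scientist", "investigation", "study"]

-- ===== PORT A =====
def is_research_role_py (role_info : List (String × String)) (requirements : List String) (responsibilities : List String) : Bool :=
  let research_keywords := pvResearchKeywords
  let role_category := PySem.Str.lower ((PySem.Dict.mk role_info).getD "role_category" "")
  if research_keywords.any (fun keyword => PySem.Str.isIn keyword role_category) then true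
  else
    let requirements_text := PySem.Str.lower (PySem.Str.join " " requirements)
    if research_keywords.any (fun keyword => PySem.Str.isIn keyword requirements_text) then true
    else
      let responsibilities_text := PySem.Str.lower (PySem.Str.join " " responsibilities)
      if research_keywords.any (fun keyword => PySem.Str.isIn keyword responsibilities_text) then true
      else false

-- ===== PORT B =====
-- B's loop 'for i in range(len(corpus)): if any(corpus.startswith(k, i) …)' as the
-- obvious structural recursion over the corpus's suffixes; startswith(k, i) is the
-- prefix test on the i-th suffix.
def pvScanB (ks : List (List Char)) : List Char → Bool
  | [] => false
  | c :: rest => (ks.any fun k => k.isPrefixOf (c :: rest)) || pvScanB ks rest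

def is_research_role_py_alt (role_info : List (String × String)) (requirements : List String) (responsibilities : List String) : Bool :=
  let keywords := pvResearchKeywords
  let corpus := PySem.Str.lower (PySem.Str.join " "
      [(PySem.Dict.mk role_info).getD "role_category" "",
       PySem.Str.join " " requirements,
       PySem.Str.join " " responsibilities])
  pvScanB (keywords.map String.toList) corpus.toList

-- ===== PRECONDITION & SPEC =====
def Spec_is_research_role_py (role_info : List (String × String)) (requirements : List String) (responsibilities : List String) (out : Bool) : Prop := out = is_research_role_py_alt role_info requirements responsibilities
instance (role_info : List (String × String)) (requirements : List String) (responsibilities : List String) (out : Bool) : Decidable (Spec_is_research_role_py role_info requirements responsibilities out) := by unfold Spec_is_research_role_py; infer_instance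

-- ===== CLAIM (what is proved, stated in full; the proofs are below) =====
def Claim_equal_is_research_role_py : Prop := ∀ (role_info : List (String × String)) (requirements : List String) (responsibilities : List String), Dom_is_research_role_py role_info requirements responsibilities → Spec_is_research_role_py role_info requirements responsibilities (is_research_role_py role_info requirements responsibilities)

-- ===== LEMMAS AND PROOFS =====

theorem pv_prefix_of_prefix_append_cons {sub a b : List Char} {c : Char}
    (hc : c ∉ sub) (h : sub <+: a ++ c :: b) : sub <+: a := by
  induction sub generalizing a with
  | nil => exact List.nil_prefix
  | cons s t ih =>
    cases a with
    | nil =>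
      rw [List.nil_append, List.cons_prefix_cons] at h
      exact absurd (h.1 ▸ List.mem_cons_self) hc
    | cons x a' =>
      rw [List.cons_append, List.cons_prefix_cons] at h
      exact List.cons_prefix_cons.mpr
        ⟨h.1, ih (fun hm => hc (List.mem_cons_of_mem _ hm)) h.2⟩

theorem pv_infix_append_cons_iff {sub a b : List Char} {c : Char} (hc : c ∉ sub) :
    sub <:+: (a ++ c :: b) ↔ (sub <:+: a ∨ sub <:+: b) := by
  constructor
  · intro h
    induction a with
    | nil =>
      rw [List.nil_append, List.infix_cons_iff] at h
      rcases h with h | h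
      · cases sub with
        | nil => exact Or.inl (List.nil_infix)
        | cons s t =>
          rw [List.cons_prefix_cons] at h
          exact absurd (h.1 ▸ List.mem_cons_self) hc
      · exact Or.inr h
    | cons x a' ih =>
      rw [List.cons_append, List.infix_cons_iff] at h
      rcases h with h | h
      · exact Or.inl (pv_prefix_of_prefix_append_cons hc
          (by rw [List.cons_append]; exact h)).isInfix
      · rcases ih h with h' | h'
        · exact Or.inl (List.infix_cons h')
        · exact Or.inr h'
  · rintro (h | h)
    · exact h.trans (List.prefix_append a (c :: b)).isInfix
    · exact h.trans ((List.suffix_cons c b).trans (List.suffix_append a (c :: b))).isInfix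

theorem pv_isIn_sep (sub a b : List Char) (hc : ' ' ∉ sub) :
    PySem.Chars.isIn sub (a ++ ' ' :: b) = (PySem.Chars.isIn sub a || PySem.Chars.isIn sub b) := by
  rw [Bool.eq_iff_iff, Bool.or_eq_true]
  simp only [PySem.Chars.isIn_iff_infix]
  exact pv_infix_append_cons_iff hc

theorem pv_any_congr_mem {α : Type} (l : List α) (f g : α → Bool)
    (h : ∀ x ∈ l, f x = g x) : l.any f = l.any g := by
  induction l with
  | nil => rfl
  | cons x t ih =>
    simp only [List.any_cons, h x List.mem_cons_self,
      ih (fun y hy => h y (List.mem_cons_of_mem _ hy))]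

theorem pv_any_or3 {α : Type} (l : List α) (f g h : α → Bool) :
    (l.any fun x => f x || g x || h x) = (l.any f || l.any g || l.any h) := by
  induction l with
  | nil => rfl
  | cons x t ih =>
    simp only [List.any_cons, ih]
    cases f x <;> cases g x <;> cases h x <;> simp

theorem pv_no_space : ∀ k ∈ pvResearchKeywords, ' ' ∉ k.toList := by decide

theorem pv_keywords_ne_nil : ∀ k ∈ pvResearchKeywords.map String.toList, k ≠ [] := by decide

-- B's position-major scan finds exactly the keywords occurring as an infix
theorem pv_scanB_iff (ks : List (List Char)) (hne : ∀ k ∈ ks, k ≠ []) :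
    ∀ l : List Char, pvScanB ks l = true ↔ ∃ k ∈ ks, k <:+: l := by
  intro l
  induction l with
  | nil =>
    simp only [pvScanB, Bool.false_eq_true, false_iff]
    rintro ⟨k, hk, hinf⟩
    exact hne k hk (List.eq_nil_of_infix_nil hinf)
  | cons c rest ih =>
    simp only [pvScanB, Bool.or_eq_true, List.any_eq_true, ih]
    constructor
    · rintro (⟨k, hk, hp⟩ | ⟨k, hk, hi⟩)
      · exact ⟨k, hk, (List.isPrefixOf_iff_prefix.mp hp).isInfix⟩
      · exact ⟨k, hk, List.infix_cons hi⟩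
    · rintro ⟨k, hk, hi⟩
      rcases List.infix_cons_iff.mp hi with hp | hi'
      · exact Or.inl ⟨k, hk, List.isPrefixOf_iff_prefix.mpr hp⟩
      · exact Or.inr ⟨k, hk, hi'⟩

theorem pv_scanB_eq_any_isIn (ks : List (List Char)) (hne : ∀ k ∈ ks, k ≠ [])
    (l : List Char) : pvScanB ks l = ks.any (fun k => PySem.Chars.isIn k l) := by
  rw [Bool.eq_iff_iff, pv_scanB_iff ks hne l, List.any_eq_true]
  simp only [PySem.Chars.isIn_iff_infix]

-- ===== VERDICT (by name: the statement is the Claim_ definition above) =====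
theorem is_research_role_py_spec : Claim_equal_is_research_role_py := by
  intro role_info requirements responsibilities _
  unfold Spec_is_research_role_py is_research_role_py is_research_role_py_alt
  set catL := PySem.Chars.lower ((PySem.Dict.mk role_info).getD "role_category" "").toList with hcat
  set reqL := PySem.Chars.lower (PySem.Str.join " " requirements).toList with hreq
  set respL := PySem.Chars.lower (PySem.Str.join " " responsibilities).toList with hresp
  have hcorpus :
      (PySem.Str.lower (PySem.Str.join " "
        [(PySem.Dict.mk role_info).getD "role_category" "",
         PySem.Str.join " " requirements,
         PySem.Str.join " " responsibilities])).toList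
      = catL ++ ' ' :: (reqL ++ ' ' :: respL) := by
    have hsp : PySem.Chars.lowerChar ' ' = ' ' := by decide
    simp [PySem.Str.toList_lower, PySem.Str.toList_join, PySem.Chars.join,
      PySem.Chars.lower, List.intercalate, List.intersperse, List.map_append,
      hsp, hcat, hreq, hresp]
  have hB : pvScanB (pvResearchKeywords.map String.toList)
      (PySem.Str.lower (PySem.Str.join " "
        [(PySem.Dict.mk role_info).getD "role_category" "",
         PySem.Str.join " " requirements,
         PySem.Str.join " " responsibilities])).toList
      = ((pvResearchKeywords.any fun k => PySem.Chars.isIn k.toList catL) ||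
         (pvResearchKeywords.any fun k => PySem.Chars.isIn k.toList reqL) ||
         (pvResearchKeywords.any fun k => PySem.Chars.isIn k.toList respL)) := by
    rw [pv_scanB_eq_any_isIn _ pv_keywords_ne_nil, List.any_map, ← pv_any_or3]
    apply pv_any_congr_mem
    intro k hk
    rw [Function.comp_apply, hcorpus, pv_isIn_sep _ _ _ (pv_no_space k hk),
      pv_isIn_sep _ _ _ (pv_no_space k hk)]
    simp [Bool.or_assoc]
  simp only [PySem.Str.isIn_eq, PySem.Str.toList_lower] at *
  rw [hB]
  cases (pvResearchKeywords.any fun k => PySem.Chars.isIn k.toList catL) <;>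
    cases (pvResearchKeywords.any fun k => PySem.Chars.isIn k.toList reqL) <;>
      cases (pvResearchKeywords.any fun k => PySem.Chars.isIn k.toList respL) <;> simp
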